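-- pv_equiv track=rewrite | github.com/f-ras/AoC2024 | day05/helper.py | extract_faulty_updates
-- ===== SOURCE A (Python) =====
-- DEPENDEND = 0
--
-- DEPENDEND_ON_THIS = 1
--
-- def extract_faulty_updates(updates : list, order_rules : list) -> list:
-- 	faulty_updates = []
-- 	for update in updates:
-- 		is_faulty_update = False
-- 		for i in range(len(update)):
-- 			for j in range(len(order_rules)):
-- 				if update[i] == order_rules[j][DEPENDEND]:
-- 					for check in range(i):
-- 						if update[check] == order_rules[j][DEPENDEND_ON_THIS]:
-- 							is_faulty_update = True
-- 		if is_faulty_update: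
-- 			faulty_updates.append(update)
-- 	return faulty_updates
-- ===== SOURCE B (Python) =====
-- def extract_faulty_updates(updates : list, order_rules : list) -> list:
-- 	must_follow = {}
-- 	for rule in order_rules:
-- 		must_follow.setdefault(rule[0], set()).add(rule[1])
-- 	faulty_updates = []
-- 	for update in updates:
-- 		seen = set()
-- 		for page in update:
-- 			followers = must_follow.get(page)
-- 			if followers is not None and not followers.isdisjoint(seen):
-- 				faulty_updates.append(update)
-- 				break
-- 			seen.add(page)
-- 	return faulty_updates
-- ===== Notes on version B (the rewrite author's own statement) =====
-- stated objective: faster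
-- what changed: Replaces the quadruple nested index loop over updates x positions x rules x earlier-positions by a dict mapping each page to the set of pages that must follow it, built once from the rules, plus a single early-exit pass per update that intersects that set with a seen-set.
-- outside the precondition, e.g. on extract_faulty_updates([[1]], [[5]]): A returns [], B raises IndexError
import Mathlib
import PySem

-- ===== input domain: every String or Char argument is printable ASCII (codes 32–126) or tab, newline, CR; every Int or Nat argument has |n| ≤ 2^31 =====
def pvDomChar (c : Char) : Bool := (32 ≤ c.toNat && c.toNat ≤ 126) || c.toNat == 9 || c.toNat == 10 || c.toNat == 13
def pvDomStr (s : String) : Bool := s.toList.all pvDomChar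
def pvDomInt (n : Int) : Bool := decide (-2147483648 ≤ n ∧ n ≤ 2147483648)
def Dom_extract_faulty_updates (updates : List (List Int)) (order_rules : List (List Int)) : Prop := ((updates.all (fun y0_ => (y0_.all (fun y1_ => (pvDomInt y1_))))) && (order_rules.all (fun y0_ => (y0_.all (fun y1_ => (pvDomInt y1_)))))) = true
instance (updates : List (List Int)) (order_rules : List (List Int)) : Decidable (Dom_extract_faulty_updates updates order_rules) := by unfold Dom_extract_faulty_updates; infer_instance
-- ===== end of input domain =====

-- B builds a dict page -> set of pages that must follow it, once, then makes one
-- early-exit seen-set pass per update, instead of A's four nested index loops (objective: faster).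

-- ===== PORT A =====
def extract_faulty_updates (updates : List (List Int)) (order_rules : List (List Int)) : List (List Int) :=
  updates.foldl (fun faulty_updates update =>
    let is_faulty_update :=
      (PySem.List.pyRange 0 update.length 1).foldl (fun f1 i =>
        (PySem.List.pyRange 0 order_rules.length 1).foldl (fun f2 j =>
          if PySem.List.pyGetD update i 0 == PySem.List.pyGetD (PySem.List.pyGetD order_rules j []) 0 0 then
            (PySem.List.pyRange 0 i 1).foldl (fun f3 check =>
              if PySem.List.pyGetD update check 0 == PySem.List.pyGetD (PySem.List.pyGetD order_rules j []) 1 0 then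
                true
              else f3) f2
          else f2) f1) false
    if is_faulty_update then faulty_updates ++ [update] else faulty_updates) []

-- ===== PORT B =====
-- must_follow.setdefault(rule[0], set()).add(rule[1]); rule[0]/rule[1] raise IndexError on a
-- short rule (the `| _, _ => d` branch is unreachable under Pre_).
def pvBuildMustFollow (order_rules : List (List Int)) : PySem.Dict Int (PySem.Set Int) :=
  order_rules.foldl (fun d rule =>
    match PySem.List.pyGet? rule 0, PySem.List.pyGet? rule 1 with
    | some a, some b => d.insert a (PySem.Set.add (d.getD a PySem.Set.empty) b)
    | _, _ => d) PySem.Dict.empty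

-- the inner 'for page in update: … break' loop of B
def pvScanUpdate (must_follow : PySem.Dict Int (PySem.Set Int)) : List Int → PySem.Set Int → Bool
  | [], _ => false
  | page :: rest, seen =>
    match must_follow.get? page with
    | some followers =>
        if !(PySem.Set.isdisjoint followers seen) then true
        else pvScanUpdate must_follow rest (PySem.Set.add seen page)
    | none => pvScanUpdate must_follow rest (PySem.Set.add seen page)

def extract_faulty_updates_alt (updates : List (List Int)) (order_rules : List (List Int)) : List (List Int) :=
  let must_follow := pvBuildMustFollow order_rules
  updates.foldl (fun faulty_updates update =>
    if pvScanUpdate must_follow update PySem.Set.empty then faulty_updates ++ [update]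
    else faulty_updates) []

-- ===== PRECONDITION & SPEC =====
-- Pre_ excludes rule lists containing a rule shorter than two entries: reading such a rule's
-- missing entry is an IndexError in A (B always reads both entries), and A only accidentally
-- tolerates a short rule whose entries happen never to be needed.
def Pre_extract_faulty_updates (updates : List (List Int)) (order_rules : List (List Int)) : Prop :=
  ∀ r ∈ order_rules, 2 ≤ r.length
instance (updates : List (List Int)) (order_rules : List (List Int)) : Decidable (Pre_extract_faulty_updates updates order_rules) := by unfold Pre_extract_faulty_updates; infer_instance

def pvWitness_extract_faulty_updates : List (List Int) × List (List Int) :=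
  ([[1, 2], [2, 1]], [[2, 1]])

def Spec_extract_faulty_updates (updates : List (List Int)) (order_rules : List (List Int)) (out : List (List Int)) : Prop := out = extract_faulty_updates_alt updates order_rules
instance (updates : List (List Int)) (order_rules : List (List Int)) (out : List (List Int)) : Decidable (Spec_extract_faulty_updates updates order_rules out) := by unfold Spec_extract_faulty_updates; infer_instance

-- ===== CLAIM (what is proved, stated in full; the proofs are below) =====
def Claim_equal_extract_faulty_updates : Prop := ∀ (updates : List (List Int)) (order_rules : List (List Int)), Dom_extract_faulty_updates updates order_rules → Pre_extract_faulty_updates updates order_rules → Spec_extract_faulty_updates updates order_rules (extract_faulty_updates updates order_rules)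

-- ===== LEMMAS AND PROOFS =====

-- the violation predicate both programs detect: some page x of the update has, somewhere
-- before it, a page that some rule says must come after x
def pvViol (order_rules : List (List Int)) (u : List Int) : Prop :=
  ∃ pre x suf, u = pre ++ x :: suf ∧
    ∃ r ∈ order_rules, r.getD 0 0 = x ∧ r.getD 1 0 ∈ pre

theorem pvBuild_aux (x y : Int) : ∀ (rules : List (List Int)) (d : PySem.Dict Int (PySem.Set Int)),
    (∀ r ∈ rules, 2 ≤ r.length) →
    (y ∈ (rules.foldl (fun d rule =>
        match PySem.List.pyGet? rule 0, PySem.List.pyGet? rule 1 with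
        | some a, some b => d.insert a (PySem.Set.add (d.getD a PySem.Set.empty) b)
        | _, _ => d) d).getD x PySem.Set.empty ↔
      y ∈ d.getD x PySem.Set.empty ∨ ∃ r ∈ rules, r.getD 0 0 = x ∧ r.getD 1 0 = y)
  | [], d, _ => by simp
  | r :: rs, d, h => by
    obtain ⟨a, b, t, rfl⟩ : ∃ a b t, r = a :: b :: t := by
      match r, h r (by simp) with
      | a :: b :: t, _ => exact ⟨a, b, t, rfl⟩
    rw [List.foldl_cons]
    have h0 : PySem.List.pyGet? (a :: b :: t) 0 = some a := PySem.List.pyGet?_zero_cons a (b :: t)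
    have h1 : PySem.List.pyGet? (a :: b :: t) 1 = some b := by
      simp
    rw [h0, h1]
    rw [pvBuild_aux x y rs _ (fun r hr => h r (by simp [hr]))]
    rw [PySem.Dict.getD_insert]
    by_cases hx : x = a
    · subst hx
      simp [PySem.Set.mem_add]
      tauto
    · simp [hx]
      tauto

theorem pvMem_buildMustFollow (order_rules : List (List Int))
    (hpre : ∀ r ∈ order_rules, 2 ≤ r.length) (x y : Int) :
    y ∈ (pvBuildMustFollow order_rules).getD x PySem.Set.empty ↔
      ∃ r ∈ order_rules, r.getD 0 0 = x ∧ r.getD 1 0 = y := by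
  rw [pvBuildMustFollow, pvBuild_aux x y order_rules PySem.Dict.empty hpre]
  simp

theorem pvScan_iff (mf : PySem.Dict Int (PySem.Set Int)) :
    ∀ (u : List Int) (seen : PySem.Set Int),
    (pvScanUpdate mf u seen = true ↔
      ∃ pre x suf, u = pre ++ x :: suf ∧
        ∃ y ∈ List.foldl PySem.Set.add seen pre, y ∈ mf.getD x PySem.Set.empty)
  | [], seen => by
    simp only [pvScanUpdate]
    constructor
    · intro h; cases h
    · rintro ⟨pre, x, suf, h, -⟩
      exact absurd h.symm (by simp)
  | page :: rest, seen => by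
    have hcons : ∀ (pre : List Int) (x : Int) (suf : List Int),
        (page :: rest = pre ++ x :: suf) ↔
          (pre = [] ∧ x = page ∧ suf = rest) ∨
          ∃ pre', pre = page :: pre' ∧ rest = pre' ++ x :: suf := by
      intro pre x suf
      cases pre with
      | nil => simp [eq_comm]
      | cons p ps => simp [eq_comm]
    have key : (∃ pre x suf, page :: rest = pre ++ x :: suf ∧
        ∃ y ∈ List.foldl PySem.Set.add seen pre, y ∈ mf.getD x PySem.Set.empty) ↔
        ((∃ y ∈ seen, y ∈ mf.getD page PySem.Set.empty) ∨
         (∃ pre x suf, rest = pre ++ x :: suf ∧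
           ∃ y ∈ List.foldl PySem.Set.add (PySem.Set.add seen page) pre, y ∈ mf.getD x PySem.Set.empty)) := by
      constructor
      · rintro ⟨pre, x, suf, hdec, y, hy1, hy2⟩
        rcases (hcons pre x suf).mp hdec with ⟨rfl, rfl, rfl⟩ | ⟨pre', rfl, hrest⟩
        · exact Or.inl ⟨y, hy1, hy2⟩
        · exact Or.inr ⟨pre', x, suf, hrest, y, hy1, hy2⟩
      · rintro (⟨y, hy1, hy2⟩ | ⟨pre, x, suf, hrest, y, hy1, hy2⟩)
        · exact ⟨[], page, rest, by simp, y, hy1, hy2⟩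
        · exact ⟨page :: pre, x, suf, by simp [hrest], y, hy1, hy2⟩
    rw [key]
    show (match mf.get? page with
      | some followers =>
          if !(PySem.Set.isdisjoint followers seen) then true
          else pvScanUpdate mf rest (PySem.Set.add seen page)
      | none => pvScanUpdate mf rest (PySem.Set.add seen page)) = true ↔ _
    cases hmf : mf.get? page with
    | none =>
      have hget : mf.getD page PySem.Set.empty = PySem.Set.empty :=
        PySem.Dict.getD_of_get?_eq_none mf _ hmf
      simp only [hget]
      rw [pvScan_iff mf rest (PySem.Set.add seen page)]
      constructor
      · exact Or.inr
      · rintro (⟨y, -, hy⟩ | h)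
        · exact absurd hy (by simp [PySem.Set.empty])
        · exact h
    | some followers =>
      have hget : mf.getD page PySem.Set.empty = followers :=
        PySem.Dict.getD_of_get?_eq_some mf _ hmf
      simp only [hget]
      by_cases hdis : PySem.Set.isdisjoint followers seen = true
      · have hnone : ¬ ∃ y ∈ seen, y ∈ followers := by
          rintro ⟨y, hy1, hy2⟩
          exact (PySem.Set.isdisjoint_iff followers seen).mp hdis y hy2 hy1
        simp only [hdis]
        rw [show (!true) = false by rfl]
        simp only [Bool.false_eq_true, if_false]
        rw [pvScan_iff mf rest (PySem.Set.add seen page)]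
        constructor
        · exact Or.inr
        · rintro (⟨y, hy1, hy2⟩ | h)
          · exact absurd ⟨y, hy1, hy2⟩ hnone
          · exact h
      · have hex : ∃ y ∈ followers, y ∈ seen := by
          by_contra hne
          exact hdis ((PySem.Set.isdisjoint_iff followers seen).mpr
            (fun z hz hzs => hne ⟨z, hz, hzs⟩))
        rw [Bool.not_eq_true] at hdis
        simp only [hdis]
        rw [show (!false) = true by rfl]
        simp only [if_true]
        obtain ⟨y, hy1, hy2⟩ := hex
        simp only [true_iff]
        exact Or.inl ⟨y, hy2, hy1⟩

theorem pvFlag_iff (order_rules : List (List Int)) (u : List Int) :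
    ((PySem.List.pyRange 0 u.length 1).foldl (fun f1 i =>
        (PySem.List.pyRange 0 order_rules.length 1).foldl (fun f2 j =>
          if PySem.List.pyGetD u i 0 == PySem.List.pyGetD (PySem.List.pyGetD order_rules j []) 0 0 then
            (PySem.List.pyRange 0 i 1).foldl (fun f3 check =>
              if PySem.List.pyGetD u check 0 == PySem.List.pyGetD (PySem.List.pyGetD order_rules j []) 1 0 then
                true
              else f3) f2
          else f2) f1) false) = true ↔ pvViol order_rules u := by
  have hmid : ∀ (f1 : Bool), ∀ i ∈ PySem.List.pyRange 0 u.length 1,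
      ((PySem.List.pyRange 0 order_rules.length 1).foldl (fun f2 j =>
          if PySem.List.pyGetD u i 0 == PySem.List.pyGetD (PySem.List.pyGetD order_rules j []) 0 0 then
            (PySem.List.pyRange 0 i 1).foldl (fun f3 check =>
              if PySem.List.pyGetD u check 0 == PySem.List.pyGetD (PySem.List.pyGetD order_rules j []) 1 0 then
                true
              else f3) f2
          else f2) f1)
      = (f1 || (PySem.List.pyRange 0 order_rules.length 1).any (fun j =>
          (PySem.List.pyGetD u i 0 == PySem.List.pyGetD (PySem.List.pyGetD order_rules j []) 0 0) &&
          (PySem.List.pyRange 0 i 1).any (fun check =>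
            PySem.List.pyGetD u check 0 == PySem.List.pyGetD (PySem.List.pyGetD order_rules j []) 1 0))) := by
    intro f1 i _
    simp only [PySem.List.foldl_if_true_eq]
    rw [PySem.List.foldl_congr_mem _ _
      (fun f2 j =>
        if ((PySem.List.pyGetD u i 0 == PySem.List.pyGetD (PySem.List.pyGetD order_rules j []) 0 0) &&
          (PySem.List.pyRange 0 i 1).any (fun check =>
            PySem.List.pyGetD u check 0 == PySem.List.pyGetD (PySem.List.pyGetD order_rules j []) 1 0)) = true
        then true else f2) f1
      (by
        intro acc j _
        cases hc : (PySem.List.pyGetD u i 0 == PySem.List.pyGetD (PySem.List.pyGetD order_rules j []) 0 0) <;>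
          cases hk : (PySem.List.pyRange 0 i 1).any (fun check =>
            PySem.List.pyGetD u check 0 == PySem.List.pyGetD (PySem.List.pyGetD order_rules j []) 1 0) <;>
          simp [hc, hk])]
    rw [PySem.List.foldl_if_true_eq]
  rw [PySem.List.foldl_congr_mem _ _
    (fun f1 i =>
      if ((PySem.List.pyRange 0 order_rules.length 1).any (fun j =>
          (PySem.List.pyGetD u i 0 == PySem.List.pyGetD (PySem.List.pyGetD order_rules j []) 0 0) &&
          (PySem.List.pyRange 0 i 1).any (fun check =>
            PySem.List.pyGetD u check 0 == PySem.List.pyGetD (PySem.List.pyGetD order_rules j []) 1 0))) = true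
      then true else f1) false
    (by
      intro acc i hi
      rw [hmid acc i hi]
      cases hP : (PySem.List.pyRange 0 order_rules.length 1).any (fun j =>
          (PySem.List.pyGetD u i 0 == PySem.List.pyGetD (PySem.List.pyGetD order_rules j []) 0 0) &&
          (PySem.List.pyRange 0 i 1).any (fun check =>
            PySem.List.pyGetD u check 0 == PySem.List.pyGetD (PySem.List.pyGetD order_rules j []) 1 0)) <;>
        simp [hP])]
  rw [PySem.List.foldl_if_true_eq]
  simp only [Bool.false_or, List.any_eq_true, PySem.List.mem_pyRange_one, Bool.and_eq_true,
    beq_iff_eq]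
  constructor
  · rintro ⟨i, ⟨hi0, hiu⟩, j, ⟨hj0, hjR⟩, hx, k, ⟨hk0, hki⟩, hy⟩
    have hnu : i.toNat < u.length := by omega
    have hnr : j.toNat < order_rules.length := by omega
    have hku : k.toNat < u.length := by omega
    have hkn : k.toNat < i.toNat := by omega
    rw [PySem.List.pyGetD_eq_getElem u 0 hi0 hiu,
        PySem.List.pyGetD_eq_getElem order_rules [] hj0 hjR,
        PySem.List.pyGetD_zero] at hx
    rw [PySem.List.pyGetD_eq_getElem u 0 hk0 (by omega),
        PySem.List.pyGetD_eq_getElem order_rules [] hj0 hjR,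
        PySem.List.pyGetD_ofNat'] at hy
    refine ⟨u.take i.toNat, u[i.toNat], u.drop (i.toNat + 1), ?_,
      order_rules[j.toNat], List.getElem_mem hnr, hx.symm, ?_⟩
    · conv_lhs => rw [← List.take_append_drop i.toNat u]
      rw [List.drop_eq_getElem_cons hnu]
    · rw [← hy]
      have : (u.take i.toNat)[k.toNat]'(by simp; omega) = u[k.toNat] :=
        List.getElem_take
      rw [← this]
      exact List.getElem_mem _
  · rintro ⟨pre, x, suf, rfl, r, hr, hr0, hr1⟩
    obtain ⟨n, hn, rfl⟩ := List.getElem_of_mem hr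
    obtain ⟨m, hm, hmy⟩ := List.getElem_of_mem hr1
    refine ⟨(pre.length : Int), ⟨by positivity, by simp⟩,
      (n : Int), ⟨by positivity, by exact_mod_cast hn⟩, ?_,
      (m : Int), ⟨by positivity, by exact_mod_cast hm⟩, ?_⟩
    · rw [PySem.List.pyGetD_eq_getElem _ 0 (by positivity) (by simp only [List.length_append, List.length_cons]; push_cast; omega),
          PySem.List.pyGetD_eq_getElem order_rules [] (by positivity) (by exact_mod_cast hn),
          PySem.List.pyGetD_zero]
      simp only [Int.toNat_natCast]
      rw [List.getElem_append_right (Nat.le_refl pre.length)]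
      simp [← hr0]
    · rw [PySem.List.pyGetD_eq_getElem _ 0 (by positivity) (by simp only [List.length_append, List.length_cons]; push_cast; omega),
          PySem.List.pyGetD_eq_getElem order_rules [] (by positivity) (by exact_mod_cast hn),
          PySem.List.pyGetD_ofNat']
      simp only [Int.toNat_natCast]
      rw [List.getElem_append_left hm]
      exact hmy

theorem pvBool_eq_of_iff (a b : Bool) (h : a = true ↔ b = true) : a = b := by
  cases a <;> cases b <;> simp_all

-- ===== VERDICT (by name: the statement is the Claim_ definition above) =====
theorem extract_faulty_updates_spec : Claim_equal_extract_faulty_updates := by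
  intro updates order_rules _ hpre
  unfold Spec_extract_faulty_updates extract_faulty_updates extract_faulty_updates_alt
  rw [PySem.List.foldl_append_if_eq_filter, PySem.List.foldl_append_if_eq_filter]
  refine congrArg _ (List.filter_congr ?_)
  intro u _
  apply pvBool_eq_of_iff
  rw [pvFlag_iff order_rules u, pvScan_iff (pvBuildMustFollow order_rules) u PySem.Set.empty]
  unfold pvViol
  constructor
  · rintro ⟨pre, x, suf, hdec, r, hr, hr0, hr1⟩
    refine ⟨pre, x, suf, hdec, r.getD 1 0, ?_, ?_⟩
    · rw [PySem.Set.mem_foldl_add pre (fun b => b) PySem.Set.empty]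
      exact Or.inr ⟨r.getD 1 0, hr1, rfl⟩
    · exact (pvMem_buildMustFollow order_rules hpre x (r.getD 1 0)).mpr ⟨r, hr, hr0, rfl⟩
  · rintro ⟨pre, x, suf, hdec, y, hy1, hy2⟩
    obtain ⟨r, hr, hr0, hr1⟩ := (pvMem_buildMustFollow order_rules hpre x y).mp hy2
    rw [PySem.Set.mem_foldl_add pre (fun b => b) PySem.Set.empty] at hy1
    rcases hy1 with hy1 | ⟨b, hb, rfl⟩
    · exact absurd hy1 (by simp [PySem.Set.empty])
    · exact ⟨pre, x, suf, hdec, r, hr, hr0, hr1 ▸ hb⟩
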